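-- pv_equiv track=rewrite | github.com/MrPatchara/Smart-Multi-Stage-Fitness-Test-System | src/multi_stage_beep_test.py | get_beep_test_distance
-- ===== SOURCE A (Python) =====
-- def get_beep_test_distance(level, shuttle):
--     # ตารางจำนวน shuttle ต่อ level (ตามมาตรฐาน Ramsbottom & Léger)
--     shuttles_per_level = {
--         1: 7, 2: 8, 3: 8, 4: 9, 5: 9,
--         6: 10, 7: 10, 8: 11, 9: 11,
--         10: 11, 11: 12, 12: 12, 13: 13,
--         14: 13, 15: 13, 16: 14, 17: 14,
--         18: 15, 19: 15, 20: 16, 21: 16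
--     }
--
--     total_shuttles = 0
--
--     # สะสม shuttle ของทุก level ก่อนหน้า
--     for l in range(1, level):
--         total_shuttles += shuttles_per_level.get(l, 0)
--
--     # เพิ่ม shuttle ของ level ปัจจุบัน
--     total_shuttles += shuttle
--
--     return total_shuttles * 20  # ระยะทาง 1 shuttle = 20 เมตร
-- ===== SOURCE B (Python) =====
-- # B: prefix-sum table lookup with clamped index instead of a per-level accumulation loop (simpler, O(1)).
-- _CUM = [0, 7, 15, 23, 32, 41, 51, 61, 72, 83, 94, 106, 118, 131, 144, 157, 171, 185, 200, 215, 231, 247]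
--
-- def get_beep_test_distance(level, shuttle):
--     idx = min(max(level - 1, 0), 21)
--     return (_CUM[idx] + shuttle) * 20
-- ===== Notes on version B (the rewrite author's own statement) =====
-- stated objective: simpler
-- what changed: Replaces the per-level accumulation loop over range(1, level) with a precomputed prefix-sum table indexed by the level clamped to [0, 21] (O(1) vs O(level)).
import Mathlib
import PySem

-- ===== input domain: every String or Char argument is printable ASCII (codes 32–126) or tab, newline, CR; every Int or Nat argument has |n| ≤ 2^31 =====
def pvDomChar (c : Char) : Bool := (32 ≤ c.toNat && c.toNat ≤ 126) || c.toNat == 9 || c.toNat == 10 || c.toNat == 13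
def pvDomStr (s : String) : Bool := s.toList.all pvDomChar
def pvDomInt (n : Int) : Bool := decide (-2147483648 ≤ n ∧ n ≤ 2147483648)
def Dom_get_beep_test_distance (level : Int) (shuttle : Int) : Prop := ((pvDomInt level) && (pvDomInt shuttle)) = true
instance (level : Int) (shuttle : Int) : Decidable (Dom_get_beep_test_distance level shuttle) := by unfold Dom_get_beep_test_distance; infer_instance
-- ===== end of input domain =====

-- B replaces A's per-level accumulation loop by a prefix-sum table lookup with a clamped index (simpler, O(1)).

-- ===== PORT A =====
def shuttles_per_level : PySem.Dict Int Int :=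
  PySem.Dict.ofList [(1, 7), (2, 8), (3, 8), (4, 9), (5, 9),
    (6, 10), (7, 10), (8, 11), (9, 11),
    (10, 11), (11, 12), (12, 12), (13, 13),
    (14, 13), (15, 13), (16, 14), (17, 14),
    (18, 15), (19, 15), (20, 16), (21, 16)]

def get_beep_test_distance (level : Int) (shuttle : Int) : Int :=
  let total_shuttles : Int := 0
  let total_shuttles :=
    (PySem.List.pyRange 1 level 1).foldl
      (fun acc l => acc + shuttles_per_level.getD l 0) total_shuttles
  let total_shuttles := total_shuttles + shuttle
  total_shuttles * 20

-- ===== PORT B =====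
def pvCum : List Int :=
  [0, 7, 15, 23, 32, 41, 51, 61, 72, 83, 94, 106, 118, 131, 144, 157, 171, 185, 200, 215, 231, 247]

def get_beep_test_distance_alt (level : Int) (shuttle : Int) : Int :=
  let idx := min (max (level - 1) 0) 21
  (PySem.List.pyGetD pvCum idx 0 + shuttle) * 20

-- ===== PRECONDITION & SPEC =====
def Spec_get_beep_test_distance (level : Int) (shuttle : Int) (out : Int) : Prop := out = get_beep_test_distance_alt level shuttle
instance (level : Int) (shuttle : Int) (out : Int) : Decidable (Spec_get_beep_test_distance level shuttle out) := by unfold Spec_get_beep_test_distance; infer_instance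

-- ===== CLAIM (what is proved, stated in full; the proofs are below) =====
def Claim_equal_get_beep_test_distance : Prop := ∀ (level : Int) (shuttle : Int), Dom_get_beep_test_distance level shuttle → Spec_get_beep_test_distance level shuttle (get_beep_test_distance level shuttle)

-- ===== LEMMAS AND PROOFS =====

-- the dict returns 0 beyond level 21
lemma shuttles_mk : shuttles_per_level = PySem.Dict.mk [(1, 7), (2, 8), (3, 8), (4, 9), (5, 9),
    (6, 10), (7, 10), (8, 11), (9, 11), (10, 11), (11, 12), (12, 12), (13, 13),
    (14, 13), (15, 13), (16, 14), (17, 14), (18, 15), (19, 15), (20, 16), (21, 16)] := by decide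

lemma getD_zero_of_ge (l : Int) (h : 22 ≤ l) : shuttles_per_level.getD l 0 = 0 := by
  have hne : ∀ k : Int, k ≤ 21 → (k == l) = false := fun k hk => by
    simp only [beq_eq_false_iff_ne]; omega
  rw [shuttles_mk]
  simp [PySem.Dict.getD, PySem.Dict.get?_mk_cons,
    hne 1 (by norm_num), hne 2 (by norm_num), hne 3 (by norm_num), hne 4 (by norm_num),
    hne 5 (by norm_num), hne 6 (by norm_num), hne 7 (by norm_num), hne 8 (by norm_num),
    hne 9 (by norm_num), hne 10 (by norm_num), hne 11 (by norm_num), hne 12 (by norm_num),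
    hne 13 (by norm_num), hne 14 (by norm_num), hne 15 (by norm_num), hne 16 (by norm_num),
    hne 17 (by norm_num), hne 18 (by norm_num), hne 19 (by norm_num), hne 20 (by norm_num),
    hne 21 (by norm_num)]
  rfl

lemma foldl_zero_of_all (xs : List Int) (acc : Int)
    (hmem : ∀ l ∈ xs, shuttles_per_level.getD l 0 = 0) :
    xs.foldl (fun a l => a + shuttles_per_level.getD l 0) acc = acc := by
  induction xs generalizing acc with
  | nil => rfl
  | cons x xs ih =>
    simp only [List.foldl_cons]
    rw [hmem x (by simp), ih _ (fun l hl => hmem l (by simp [hl]))]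
    omega

lemma foldl_tail_zero (level : Int) (acc : Int) (_h : 22 ≤ level) :
    (PySem.List.pyRange 22 level 1).foldl (fun a l => a + shuttles_per_level.getD l 0) acc = acc := by
  apply foldl_zero_of_all
  intro l hl
  rw [PySem.List.mem_pyRange_one] at hl
  exact getD_zero_of_ge l hl.1

-- ===== VERDICT (by name: the statement is the Claim_ definition above) =====
theorem get_beep_test_distance_spec : Claim_equal_get_beep_test_distance := by
  intro level shuttle _
  unfold Spec_get_beep_test_distance
  by_cases hle : level ≤ 22
  · by_cases h1 : level ≤ 1
    · rw [get_beep_test_distance, get_beep_test_distance_alt,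
        PySem.List.pyRange_one_eq_nil h1]
      have h0 : min (max (level - 1) 0) 21 = 0 := by omega
      simp [h0, PySem.List.pyGetD, pvCum]
    · push Not at h1
      interval_cases level <;>
        · simp [get_beep_test_distance, get_beep_test_distance_alt, pvCum,
            PySem.List.pyGetD, PySem.List.pyRange, shuttles_mk,
            PySem.Dict.getD, PySem.Dict.get?_mk_cons, List.foldl_cons, List.foldl_nil,
            List.range_succ]
          try omega
  · push Not at hle
    have hsplit := PySem.List.pyRange_one_append 1 22 level (by norm_num) (by omega)
    rw [get_beep_test_distance, get_beep_test_distance_alt]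
    simp only [hsplit, List.foldl_append]
    rw [foldl_tail_zero level _ (by omega)]
    have hidx : min (max (level - 1) 0) 21 = 21 := by omega
    simp [hidx, pvCum, PySem.List.pyGetD, PySem.List.pyRange,
      shuttles_mk, PySem.Dict.getD, PySem.Dict.get?_mk_cons, List.foldl_cons, List.foldl_nil, List.range_succ]
    try omega
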